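-- pv_equiv track=rewrite | github.com/MarkParker5/STARK | stark/tools/strtools.py | find_substring_in_words_map
-- ===== SOURCE A (Python) =====
-- def find_substring_in_words_map(substr: str, words: list[str]) -> list[list[int]]:
--     remaining = substr.strip()
--
--     to_return_candidates: list[int] = []
--     to_return: list[list[int]] = []
--
--     for i, word in enumerate(words):
--         if remaining in word:
--             remaining = ""
--             to_return_candidates.append(i)
--
--         elif interception := endswith_startof(word, remaining):
--             remaining = remaining[len(interception) :].strip()
--             to_return_candidates.append(i)
--
--         elif word.startswith(remaining):
--             remaining = ""
--             to_return_candidates.append(i)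
--
--         else:
--             remaining = substr.strip()
--             to_return_candidates = []
--
--         if not remaining:
--             remaining = substr.strip()
--             to_return.append(to_return_candidates)
--             to_return_candidates = []
--
--     return to_return
--
-- def endswith_startof(s1: str, s2: str) -> str:
--     i, j = 0, 0
--     n1, n2 = len(s1), len(s2)
--
--     while i < n1:
--         j = 0
--         temp = ""
--         while j < n2 and i + j < n1:
--             if s1[i + j] != s2[j]:
--                 break
--             temp += s1[i + j]
--             j += 1
--
--         if j == n2:
--             return s2
--
--         if j > 0 and i + j == n1:
--             return temp
--
--         i += 1
--
--     return ""
-- ===== SOURCE B (Python) =====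
-- def _overlap(s1: str, s2: str) -> str:
--     # s2 if s2 occurs in s1, else the longest suffix of s1 that is a prefix of s2
--     if s2 in s1:
--         return s2
--     for k in range(min(len(s1), len(s2)), 0, -1):
--         if s1.endswith(s2[:k]):
--             return s2[:k]
--     return ""
--
-- def find_substring_in_words_map(substr: str, words: list[str]) -> list[list[int]]:
--     target = substr.strip()
--     rem = target
--     group: list[int] = []
--     result: list[list[int]] = []
--     for i, word in enumerate(words):
--         ov = _overlap(word, rem)
--         if ov == rem:
--             rem = ""
--             group.append(i)
--         elif ov:
--             rem = rem[len(ov):].strip()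
--             group.append(i)
--         else:
--             rem = target
--             group = []
--         if not rem:
--             rem = target
--             result.append(group)
--             group = []
--     return result
-- ===== Notes on version B (the rewrite author's own statement) =====
-- stated objective: simpler
-- what changed: A's hand-written nested while-loop scan (endswith_startof, ascending start positions building the match char by char) is replaced by a substring-containment test plus a descending prefix/endswith loop for the longest suffix-prefix overlap, and A's unreachable word.startswith branch is dropped, collapsing the four-way branch to three.
import Mathlib
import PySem

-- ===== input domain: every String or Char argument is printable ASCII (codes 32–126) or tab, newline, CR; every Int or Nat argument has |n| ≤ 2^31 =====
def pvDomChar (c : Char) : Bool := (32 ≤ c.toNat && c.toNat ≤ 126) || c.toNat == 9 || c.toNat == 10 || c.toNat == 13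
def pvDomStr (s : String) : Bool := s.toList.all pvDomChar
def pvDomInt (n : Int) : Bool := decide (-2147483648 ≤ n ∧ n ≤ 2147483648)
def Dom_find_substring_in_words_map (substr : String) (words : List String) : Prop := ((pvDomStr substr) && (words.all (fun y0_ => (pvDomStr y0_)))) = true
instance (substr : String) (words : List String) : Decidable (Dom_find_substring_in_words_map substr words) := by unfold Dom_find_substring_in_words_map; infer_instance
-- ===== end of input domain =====

-- B replaces A's hand-written nested-while overlap scan by a substring test plus a
-- descending prefix/endswith loop, and drops A's dead `startswith` branch (objective: simpler).

-- ===== PORT A =====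

-- outcome of the inner while loop of endswith_startof:
-- full = (j == n2), suff temp = ran off s1 (i + j == n1) with the matched chars, brk = mismatch
inductive EwsoRes where
  | full : EwsoRes
  | suff : List Char → EwsoRes
  | brk : EwsoRes
deriving DecidableEq, Repr

-- inner while: compares s1[i+j] with s2[j]; first argument is the unread part s1.drop i, second s2
def ewsoInner : List Char → List Char → List Char → EwsoRes
  | _, [], _ => .full
  | [], _ :: _, temp => .suff temp
  | x :: a, y :: b, temp => if x ≠ y then .brk else ewsoInner a b (temp ++ [x])

-- outer while over i (represented by the suffix s1.drop i of the first string s1)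
def ewsoOuter (s2 : List Char) : List Char → List Char
  | [] => []
  | c :: rest =>
    match ewsoInner (c :: rest) s2 [] with
    | .full => s2
    | .suff temp => if 0 < temp.length then temp else ewsoOuter s2 rest
    | .brk => ewsoOuter s2 rest

-- one iteration of A's for-loop; state = (i, remaining, to_return_candidates, to_return)
def fswmStepA (target : List Char)
    (st : Int × List Char × List Int × List (List Int)) (word : String) :
    Int × List Char × List Int × List (List Int) :=
  let (i, rem, cands, out) := st
  let w := word.toList
  let (rem', cands') :=
    if PySem.Chars.isIn rem w then ([], cands ++ [i])
    else
      let ic := ewsoOuter rem w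
      if ic ≠ [] then (PySem.Chars.strip (rem.drop ic.length), cands ++ [i])
      else if PySem.Chars.startswith w rem then ([], cands ++ [i])
      else (target, [])
  if rem' = [] then (i + 1, target, ([] : List Int), out ++ [cands'])
  else (i + 1, rem', cands', out)

def find_substring_in_words_map (substr : String) (words : List String) : List (List Int) :=
  (words.foldl (fswmStepA (PySem.Chars.strip substr.toList))
    (0, PySem.Chars.strip substr.toList, [], [])).2.2.2

-- ===== PORT B =====

-- Source B's descending loop: for k in range(min(len(s1), len(s2)), 0, -1): if s1.endswith(s2[:k]) …
def ovDown (s1 s2 : List Char) : Nat → List Char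
  | 0 => []
  | k + 1 => if PySem.Chars.endswith s1 (s2.take (k + 1)) then s2.take (k + 1) else ovDown s1 s2 k

def overlapB (s1 s2 : List Char) : List Char :=
  if PySem.Chars.isIn s2 s1 then s2 else ovDown s1 s2 (min s1.length s2.length)

-- one iteration of B's for-loop; state = (i, rem, group, result)
def fswmStepB (target : List Char)
    (st : Int × List Char × List Int × List (List Int)) (word : String) :
    Int × List Char × List Int × List (List Int) :=
  let (i, rem, group, result) := st
  let ov := overlapB word.toList rem
  let (rem', group') :=
    if ov = rem then (([] : List Char), group ++ [i])
    else if ov ≠ [] then (PySem.Chars.strip (rem.drop ov.length), group ++ [i])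
    else (target, ([] : List Int))
  if rem' = [] then (i + 1, target, ([] : List Int), result ++ [group'])
  else (i + 1, rem', group', result)

def find_substring_in_words_map_alt (substr : String) (words : List String) : List (List Int) :=
  (words.foldl (fswmStepB (PySem.Chars.strip substr.toList))
    (0, PySem.Chars.strip substr.toList, [], [])).2.2.2

-- ===== PRECONDITION & SPEC =====
def Spec_find_substring_in_words_map (substr : String) (words : List String) (out : List (List Int)) : Prop := out = find_substring_in_words_map_alt substr words
instance (substr : String) (words : List String) (out : List (List Int)) : Decidable (Spec_find_substring_in_words_map substr words out) := by unfold Spec_find_substring_in_words_map; infer_instance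

-- ===== CLAIM (what is proved, stated in full; the proofs are below) =====
def Claim_equal_find_substring_in_words_map : Prop := ∀ (substr : String) (words : List String), Dom_find_substring_in_words_map substr words → Spec_find_substring_in_words_map substr words (find_substring_in_words_map substr words)

-- ===== LEMMAS AND PROOFS =====

theorem ewsoInner_eq (a : List Char) : ∀ (b temp : List Char),
    ewsoInner a b temp =
      if b <+: a then .full
      else if a <+: b then .suff (temp ++ a)
      else .brk := by
  induction a with
  | nil =>
    intro b temp
    cases b with
    | nil => simp [ewsoInner]
    | cons y b => simp [ewsoInner]
  | cons x a ih =>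
    intro b temp
    cases b with
    | nil => simp [ewsoInner]
    | cons y b =>
      by_cases hxy : x = y
      · subst hxy
        simp only [ewsoInner, ne_eq, not_true_eq_false, if_false, ih, List.cons_prefix_cons,
          true_and]
        by_cases hb : b <+: a
        · simp [hb]
        · by_cases hab : a <+: b
          · simp [hb, hab]
          · simp [hb, hab]
      · have hyx : ¬ y = x := fun h => hxy h.symm
        simp [ewsoInner, hxy, hyx, List.cons_prefix_cons]

theorem ewsoOuter_of_infix (s2 : List Char) : ∀ (s1 : List Char),
    s2 <:+: s1 → ewsoOuter s2 s1 = s2 := by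
  intro s1
  induction s1 with
  | nil =>
    intro h
    rw [List.eq_nil_of_infix_nil h]
    rfl
  | cons c rest ih =>
    intro h
    by_cases hp : s2 <+: (c :: rest)
    · simp [ewsoOuter, ewsoInner_eq, hp]
    · have hrest : s2 <:+: rest := by
        rcases (List.infix_cons_iff.mp h) with h1 | h1
        · exact absurd h1 hp
        · exact h1
      have hq : ¬ (c :: rest) <+: s2 := by
        intro hq
        have h1 := hq.length_le
        have h2 := hrest.length_le
        simp at h1
        omega
      simp [ewsoOuter, ewsoInner_eq, hp, hq, ih hrest]

theorem ovDown_cons_eq (c : Char) (rest s2 : List Char) :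
    ∀ k, k ≤ rest.length → ovDown (c :: rest) s2 k = ovDown rest s2 k := by
  intro k
  induction k with
  | zero => intro _; rfl
  | succ m ih =>
    intro hk
    have hlen : (s2.take (m + 1)).length ≤ rest.length := by
      have := List.length_take_le (m + 1) s2
      omega
    have hiff : (s2.take (m + 1)) <:+ (c :: rest) ↔ (s2.take (m + 1)) <:+ rest := by
      constructor
      · intro h
        rcases List.suffix_cons_iff.mp h with h1 | h1
        · exfalso
          have := congrArg List.length h1
          simp at this
          omega
        · exact h1
      · intro h
        exact h.trans (List.suffix_cons c rest)
    rw [ovDown, ovDown]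
    by_cases hc : (s2.take (m + 1)) <:+ rest
    · simp [PySem.Chars.endswith_iff, hiff, hc]
    · simp only [PySem.Chars.endswith_iff]
      rw [if_neg (by rw [hiff]; exact hc), if_neg hc]
      exact ih (by omega)

theorem ewsoOuter_of_not_infix (s2 : List Char) : ∀ (s1 : List Char),
    ¬ s2 <:+: s1 → ewsoOuter s2 s1 = ovDown s1 s2 (min s1.length s2.length) := by
  intro s1
  induction s1 with
  | nil => intro _; simp [ewsoOuter, ovDown]
  | cons c rest ih =>
    intro h
    have hp : ¬ s2 <+: (c :: rest) := fun hp => h hp.isInfix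
    have hrest : ¬ s2 <:+: rest := fun hr => h (List.infix_cons_iff.mpr (Or.inr hr))
    rw [ewsoOuter, ewsoInner_eq, if_neg hp]
    by_cases hq : (c :: rest) <+: s2
    · -- word is a strict prefix of s2: A returns the whole word; B's top k fires at once
      have hlen : rest.length + 1 ≤ s2.length := by simpa using hq.length_le
      have hmin : min (c :: rest).length s2.length = rest.length + 1 := by
        simp; omega
      have htake : s2.take (rest.length + 1) = c :: rest := by
        rcases hq with ⟨t, ht⟩
        rw [← ht]
        simpa using (List.take_left' (l₂ := t) (by simp)).symm
      rw [if_pos hq]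
      simp only [hmin, ovDown, PySem.Chars.endswith_iff, htake]
      simp
    · rw [if_neg hq]
      rw [ih hrest]
      by_cases hn : s2.length ≤ rest.length
      · have h1 : min (c :: rest).length s2.length = s2.length := by simp; omega
        have h2 : min rest.length s2.length = s2.length := by simp; omega
        rw [h1, h2, ovDown_cons_eq c rest s2 s2.length hn]
      · have h1 : min (c :: rest).length s2.length = (c :: rest).length := by simp; omega
        have h2 : min rest.length s2.length = rest.length := by simp; omega
        rw [h1, h2]
        have hfalse : ¬ (s2.take (rest.length + 1)) <:+ (c :: rest) := by
          intro hs
          by_cases hbig : rest.length + 1 ≤ s2.length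
          · have hlen : (s2.take (rest.length + 1)).length = rest.length + 1 := by
              simp; omega
            have heq : s2.take (rest.length + 1) = c :: rest :=
              List.IsSuffix.eq_of_length hs (by simpa using hlen)
            exact hq (heq ▸ List.take_prefix _ s2)
          · omega
        simp only [List.length_cons, ovDown, PySem.Chars.endswith_iff]
        rw [if_neg hfalse]
        exact (ovDown_cons_eq c rest s2 rest.length le_rfl).symm

theorem ewsoOuter_eq_overlapB (s1 s2 : List Char) :
    ewsoOuter s2 s1 = overlapB s1 s2 := by
  by_cases h : s2 <:+: s1
  · rw [ewsoOuter_of_infix s2 s1 h, overlapB,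
      if_pos ((PySem.Chars.isIn_iff_infix _ _).mpr h)]
  · rw [ewsoOuter_of_not_infix s2 s1 h, overlapB,
      if_neg (by simp only [PySem.Chars.isIn_iff_infix]; exact h)]

theorem ovDown_suffix (s1 s2 : List Char) :
    ∀ k, ovDown s1 s2 k ≠ [] → ovDown s1 s2 k <:+ s1 := by
  intro k
  induction k with
  | zero => intro h; exact absurd rfl h
  | succ m ih =>
    intro h
    rw [ovDown] at h ⊢
    split_ifs at h ⊢ with hc
    · exact (PySem.Chars.endswith_iff _ _).mp hc
    · exact ih h

theorem overlapB_eq_self_iff (w rem : List Char) :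
    overlapB w rem = rem ↔ rem <:+: w := by
  constructor
  · intro h
    rw [overlapB] at h
    split_ifs at h with hc
    · exact (PySem.Chars.isIn_iff_infix _ _).mp hc
    · by_cases hnil : ovDown w rem (min w.length rem.length) = []
      · rw [hnil] at h
        exact h ▸ List.nil_infix
      · have hs := ovDown_suffix w rem _ hnil
        rw [h] at hs
        exact hs.isInfix
  · intro h
    rw [overlapB, if_pos ((PySem.Chars.isIn_iff_infix _ _).mpr h)]

theorem step_eq (target : List Char) (st : Int × List Char × List Int × List (List Int))
    (word : String) : fswmStepA target st word = fswmStepB target st word := by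
  obtain ⟨i, rem, cands, out⟩ := st
  simp only [fswmStepA, fswmStepB, ewsoOuter_eq_overlapB]
  by_cases h1 : rem <:+: word.toList
  · have ha : PySem.Chars.isIn rem word.toList = true := (PySem.Chars.isIn_iff_infix _ _).mpr h1
    have hb : overlapB word.toList rem = rem := (overlapB_eq_self_iff _ _).mpr h1
    simp [ha, hb]
  · have ha : ¬ PySem.Chars.isIn rem word.toList = true := by
      rw [PySem.Chars.isIn_iff_infix]; exact h1
    have hrem : ¬ rem = [] := fun h => h1 (h ▸ List.nil_infix)
    have hb : ¬ overlapB word.toList rem = rem :=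
      fun h => h1 ((overlapB_eq_self_iff _ _).mp h)
    have hc : ¬ PySem.Chars.startswith word.toList rem = true := by
      simp only [PySem.Chars.startswith_iff]
      exact fun hp => h1 hp.isInfix
    by_cases h2 : overlapB word.toList rem = []
    · simp [ha, hc, hrem, h2]
    · simp [ha, hb, hrem, h2]

-- ===== VERDICT (by name: the statement is the Claim_ definition above) =====
theorem find_substring_in_words_map_spec : Claim_equal_find_substring_in_words_map := by
  intro substr words _
  unfold Spec_find_substring_in_words_map find_substring_in_words_map find_substring_in_words_map_alt
  have h : fswmStepA (PySem.Chars.strip substr.toList)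
      = fswmStepB (PySem.Chars.strip substr.toList) := by
    funext st word; exact step_eq _ st word
  rw [h]
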